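-- pv_equiv track=rewrite | github.com/Codes24/Common | projecteuler/problem30.py | is_power_digit
-- ===== SOURCE A (Python) =====
-- def is_power_digit(digit, n):
-- 	temp_digit = digit
-- 	digit_list = []
-- 	count_digit = n
-- 	while digit//10 != 0:
-- 		digit_list.append(digit%10)
-- 		digit = digit//10
-- 	digit_list.append(digit)
-- 	total = 0
-- 	for each_num in digit_list:
-- 		total += each_num**count_digit
-- 	if total == temp_digit:
-- 		return 1
-- 	return 0
-- ===== SOURCE B (Python) =====
-- def is_power_digit(digit, n):
-- 	counts = {}
-- 	for c in str(digit):
-- 		counts[c] = counts.get(c, 0) + 1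
-- 	total = 0
-- 	for c, k in counts.items():
-- 		total += k * int(c) ** n
-- 	return 1 if total == digit else 0
-- ===== Notes on version B (the rewrite author's own statement) =====
-- stated objective: alternative
-- what changed: B builds a frequency table of the decimal-string's digit characters and computes the total as sum over DISTINCT digits of multiplicity * digit**n (each power computed once), instead of A's per-digit arithmetic extraction loop (// and %) followed by a per-digit power-summing loop.
-- outside the precondition, e.g. on is_power_digit(-3, 2): A does not finish within the time limit, B raises ValueError; on is_power_digit(1, -1): A returns 1, B returns 1; on is_power_digit(20, -1): A raises ZeroDivisionError, B raises ZeroDivisionError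
import Mathlib
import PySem

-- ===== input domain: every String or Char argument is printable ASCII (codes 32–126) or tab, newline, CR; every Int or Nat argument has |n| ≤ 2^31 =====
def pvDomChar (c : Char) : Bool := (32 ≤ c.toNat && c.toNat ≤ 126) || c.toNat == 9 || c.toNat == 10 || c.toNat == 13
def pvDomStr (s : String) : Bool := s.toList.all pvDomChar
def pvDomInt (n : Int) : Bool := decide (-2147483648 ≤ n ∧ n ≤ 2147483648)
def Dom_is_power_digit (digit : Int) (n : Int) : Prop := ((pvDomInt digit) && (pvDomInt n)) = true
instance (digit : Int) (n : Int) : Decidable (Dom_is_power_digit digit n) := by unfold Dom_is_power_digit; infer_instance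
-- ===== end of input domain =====

-- B builds a frequency table (dict) of the decimal string's digit characters and sums
-- multiplicity * digit**n over the DISTINCT digits, instead of A's per-digit arithmetic
-- extraction loop plus a per-digit power loop (objective: alternative).

-- ===== PORT A =====
-- A's while loop: 'while digit//10 != 0: digit_list.append(digit%10); digit = digit//10'.
-- The fuel argument (called with digit.toNat + 1, always enough on Pre_) only makes the
-- recursion total; inside Pre_ the fuel is never exhausted.
def pvALoop : Nat → Int → List Int → List Int
  | 0, d, acc => acc ++ [d]
  | fuel + 1, d, acc =>
    if PySem.Int.floordiv d 10 ≠ 0 then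
      pvALoop fuel (PySem.Int.floordiv d 10) (acc ++ [PySem.Int.mod d 10])
    else acc ++ [d]

def is_power_digit (digit : Int) (n : Int) : Int :=
  let temp_digit := digit
  let digit_list := pvALoop (digit.toNat + 1) digit []
  -- 'for each_num in digit_list: total += each_num ** count_digit'  (count_digit = n; ** with
  -- exponent n.toNat — exact for 0 ≤ n, which Pre_ guarantees)
  let total := digit_list.foldl (fun t e => t + e ^ n.toNat) 0
  if total = temp_digit then 1 else 0

-- ===== PORT B =====
-- Source B: frequency dict 'counts[c] = counts.get(c, 0) + 1' over str(digit), then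
-- 'for c, k in counts.items(): total += k * int(c) ** n'.
-- int(c) on the single digit characters str(digit) produces (0 ≤ digit on Pre_) is
-- c.toNat - 48 (exact on those characters); ** with exponent n.toNat is exact for 0 ≤ n.
def is_power_digit_alt (digit : Int) (n : Int) : Int :=
  let counts := (PySem.Int.toStr digit).toList.foldl
      (fun d c => d.insert c (d.getD c 0 + 1)) (PySem.Dict.empty)
  let total := counts.items.foldl
      (fun t p => t + p.2 * ((p.1.toNat : Int) - 48) ^ n.toNat) 0
  if total = digit then 1 else 0

-- ===== PRECONDITION & SPEC =====
-- Pre_ excludes digit < 0 (A's while loop never terminates there: digit//10 stays negative) and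
-- n < 0 (A's '**' then yields Python floats — outside the Int type convention — and raises
-- ZeroDivisionError whenever a digit is 0).
def Pre_is_power_digit (digit : Int) (n : Int) : Prop := 0 ≤ digit ∧ 0 ≤ n
instance (digit : Int) (n : Int) : Decidable (Pre_is_power_digit digit n) := by
  unfold Pre_is_power_digit; infer_instance

def pvWitness_is_power_digit : Int × Int := (153, 3)

def Spec_is_power_digit (digit : Int) (n : Int) (out : Int) : Prop := out = is_power_digit_alt digit n
instance (digit : Int) (n : Int) (out : Int) : Decidable (Spec_is_power_digit digit n out) := by
  unfold Spec_is_power_digit; infer_instance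

-- ===== CLAIM (what is proved, stated in full; the proofs are below) =====
def Claim_equal_is_power_digit : Prop := ∀ (digit : Int) (n : Int), Dom_is_power_digit digit n → Pre_is_power_digit digit n → Spec_is_power_digit digit n (is_power_digit digit n)

-- ===== LEMMAS AND PROOFS =====

-- the decimal digit list, least-significant first, with 0 represented as [0] (as both programs do)
def pvNDigits (m : Nat) : List Nat := if m = 0 then [0] else Nat.digits 10 m

lemma pvNDigits_step (m : Nat) (h : m / 10 ≠ 0) :
    pvNDigits m = m % 10 :: pvNDigits (m / 10) := by
  have hm : m ≠ 0 := by intro h0; simp [h0] at h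
  simp only [pvNDigits, if_neg hm, if_neg h]
  exact Nat.digits_def' (by norm_num) (Nat.pos_of_ne_zero hm)

lemma pvNDigits_small (m : Nat) (h : m < 10) : pvNDigits m = [m] := by
  rcases Nat.eq_zero_or_pos m with h0 | hp
  · simp [h0, pvNDigits]
  · have : m ≠ 0 := by omega
    rw [pvNDigits, if_neg this, Nat.digits_def' (b := 10) (by norm_num) hp]
    have h10 : m / 10 = 0 := by omega
    simp [h10, Nat.mod_eq_of_lt h]

lemma pvNDigits_lt (m d : Nat) (hd : d ∈ pvNDigits m) : d < 10 := by
  unfold pvNDigits at hd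
  split at hd
  · simp at hd; omega
  · exact Nat.digits_lt_base (by norm_num) hd

lemma pvFloordiv_nat (m : Nat) : PySem.Int.floordiv (m : Int) 10 = ((m / 10 : Nat) : Int) := by
  rw [PySem.Int.floordiv_eq_ediv_of_pos (by norm_num)]
  omega

lemma pvMod_nat (m : Nat) : PySem.Int.mod (m : Int) 10 = ((m % 10 : Nat) : Int) := by
  rw [PySem.Int.mod_eq_emod_of_pos (by norm_num)]
  omega

-- A's loop produces acc ++ the digit list (as Ints), given enough fuel
lemma pvALoop_eq (fuel : Nat) : ∀ (m : Nat) (acc : List Int), m ≤ fuel →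
    pvALoop (fuel + 1) (m : Int) acc = acc ++ (pvNDigits m).map (fun d : Nat => (d : Int)) := by
  induction fuel with
  | zero =>
    intro m acc hm
    have h0 : m = 0 := Nat.le_zero.mp hm
    subst h0
    rw [pvALoop, pvFloordiv_nat]
    norm_num [pvNDigits_small 0 (by norm_num)]
  | succ f ih =>
    intro m acc hm
    conv_lhs => rw [pvALoop]
    rw [pvFloordiv_nat, pvMod_nat]
    by_cases h : m / 10 = 0
    · rw [if_neg (by exact_mod_cast not_not_intro h)]
      rw [pvNDigits_small m (by omega)]
      simp
    · rw [if_pos (by exact_mod_cast h)]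
      have hstep : m / 10 ≤ f := by
        have : m / 10 < m := Nat.div_lt_self (by omega) (by norm_num)
        omega
      rw [ih (m / 10) _ hstep, pvNDigits_step m h]
      simp

-- Nat.toDigitsCore (the engine of str) produces the digit characters, most-significant first
lemma pvToDigitsCore_eq (fuel : Nat) : ∀ (m : Nat) (acc : List Char), m ≤ fuel →
    Nat.toDigitsCore 10 (fuel + 1) m acc
      = ((pvNDigits m).map Nat.digitChar).reverse ++ acc := by
  induction fuel with
  | zero =>
    intro m acc hm
    have h0 : m = 0 := Nat.le_zero.mp hm
    subst h0
    rw [Nat.toDigitsCore]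
    norm_num [pvNDigits_small 0 (by norm_num)]
  | succ f ih =>
    intro m acc hm
    conv_lhs => rw [Nat.toDigitsCore]
    by_cases h : m / 10 = 0
    · rw [if_pos h, pvNDigits_small m (by omega)]
      have : m % 10 = m := Nat.mod_eq_of_lt (by omega)
      simp [this]
    · rw [if_neg h]
      have hstep : m / 10 ≤ f := by
        have : m / 10 < m := Nat.div_lt_self (by omega) (by norm_num)
        omega
      rw [ih (m / 10) _ hstep, pvNDigits_step m h]
      simp

lemma pvDigitChar_val (d : Nat) (hd : d < 10) : ((Nat.digitChar d).toNat : Int) - 48 = (d : Int) := by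
  interval_cases d <;> decide

-- A's total equals the sum of d^k over the digit list
lemma pvA_total (m k : Nat) :
    (pvALoop (m + 1) (m : Int) []).foldl (fun t e => t + e ^ k) 0
      = ((pvNDigits m).map (fun d : Nat => (d : Int) ^ k)).sum := by
  rw [pvALoop_eq m m [] le_rfl, List.nil_append, PySem.List.foldl_add, List.map_map]
  simp [Function.comp_def]

-- grouping a sum by distinct values: sum over the dedup set of multiplicity * value
lemma pvCountSum (L : List Char) (f : Char → Int) :
    ((PySem.Set.ofList L).map (fun c => (L.count c : Int) * f c)).sum = (L.map f).sum := by
  have hnd : (PySem.Set.ofList L).Nodup := PySem.Set.nodup_ofList L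
  have htf : (PySem.Set.ofList L).toFinset = L.toFinset := by
    ext a
    simp [List.mem_toFinset, PySem.Set.mem_ofList]
  calc ((PySem.Set.ofList L).map (fun c => (L.count c : Int) * f c)).sum
      = ∑ a ∈ (PySem.Set.ofList L).toFinset, (L.count a : Int) * f a :=
        (List.sum_toFinset _ hnd).symm
    _ = ∑ a ∈ L.toFinset, (L.count a : Int) * f a := by rw [htf]
    _ = (L.map f).sum := by
        have h := Finset.sum_multiset_map_count (L : Multiset Char) f
        simpa [nsmul_eq_mul] using h.symm

-- the decimal string of m lists the digit characters, most-significant first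
lemma pvStr_chars (m : Nat) :
    (PySem.Int.toStr (m : Int)).toList = ((pvNDigits m).map Nat.digitChar).reverse := by
  have h1 : (PySem.Int.toStr (m : Int)).toList = Nat.toDigits 10 m := by
    rw [PySem.Int.toList_toStr, PySem.Int.toChars, if_neg (by omega : ¬ ((m : Int) < 0))]
    simp
  rw [h1, Nat.toDigits, pvToDigitsCore_eq m m [] le_rfl, List.append_nil]

-- B's total (frequency table, then multiplicity * power over distinct digits) equals the same sum
lemma pvB_total (m k : Nat) :
    ((((PySem.Int.toStr (m : Int)).toList.foldl
        (fun d c => d.insert c (d.getD c 0 + 1)) (PySem.Dict.empty)).items).foldl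
      (fun t p => t + p.2 * ((p.1.toNat : Int) - 48) ^ k) 0)
      = ((pvNDigits m).map (fun d : Nat => (d : Int) ^ k)).sum := by
  set L := (PySem.Int.toStr (m : Int)).toList with hL
  rw [PySem.Dict.foldl_insert_getD_add_one_eq_counter, PySem.Dict.items_counter,
      PySem.List.foldl_add, List.map_map]
  have hmap : ((fun p : Char × Int => p.2 * ((p.1.toNat : Int) - 48) ^ k) ∘
        fun c => (c, (L.count c : Int)))
      = fun c => (L.count c : Int) * ((c.toNat : Int) - 48) ^ k := rfl
  rw [hmap, zero_add, pvCountSum L (fun c => ((c.toNat : Int) - 48) ^ k)]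
  rw [hL, pvStr_chars m, List.map_reverse, List.sum_reverse, List.map_map]
  refine congrArg List.sum (List.map_congr_left ?_)
  intro d hd
  have hlt : d < 10 := pvNDigits_lt m d hd
  simp only [Function.comp]
  rw [pvDigitChar_val d hlt]

-- ===== VERDICT (by name: the statement is the Claim_ definition above) =====
theorem is_power_digit_spec : Claim_equal_is_power_digit := by
  intro digit n _ hpre
  obtain ⟨hd, hn⟩ := hpre
  unfold Spec_is_power_digit is_power_digit is_power_digit_alt
  obtain ⟨m, rfl⟩ : ∃ m : Nat, digit = (m : Int) := ⟨digit.toNat, (Int.toNat_of_nonneg hd).symm⟩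
  have hA := pvA_total m n.toNat
  have hB := pvB_total m n.toNat
  simp only [Int.toNat_natCast, hA, hB]
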